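-- pv_equiv track=rewrite | github.com/alexlimatds/SemEval_2023_Task_6A | DFCSC-CLS/models.py | core_sentences_idx
-- ===== SOURCE A (Python) =====
-- def n_tokens_in_core_sentences(idx_first_sent, idx_last_sent, tokenized_sentences):
--     '''
--     TODO
--     '''
--     n = 0
--     for i in range(idx_first_sent, idx_last_sent + 1):
--         n += (len(tokenized_sentences[i]) + 1) # +1 because future SEP token
--     return n
--
-- def core_sentences_idx(tokenized_sentences, max_seq_len, min_context_len):
--     '''
--     Sets the number of sequences and their respective core sentences.
--     Arguments:
--         max_seq_len: maximum number of tokens in a sequence.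
--         min_context_len: desired minimum number of neighbor tokens.
--         tokenized_sentences: list of list of integers (token IDs)
--     Returns:
--         List of tuples. Each tuple represents a sequence and it has two
--         integers: index of first and last sentences in the sequence.
--     '''
--     threshold_ctx = max_seq_len - min_context_len - 2 # -2 because CLS and first SEP
--
--     n_sentences = len(tokenized_sentences)
--     idx_core_sentences = [] # list of tuple of 2 integers (indexes of first and last core sentences in a sequence)
--     idx_current_sent = 0
--     while idx_current_sent < n_sentences:
--         # new sequence
--         idx_start = idx_current_sent # begining of current sequence
--         idx_end = idx_current_sent   # end of current sequence
--         idx_current_sent += 1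
--         len_core_sent_in_seq = n_tokens_in_core_sentences(idx_start, idx_end, tokenized_sentences)
--         while len_core_sent_in_seq < threshold_ctx and idx_current_sent < n_sentences:
--             # checking if current sentence fits into the sequence while maintain minimum context length
--             if len_core_sent_in_seq + len(tokenized_sentences[idx_current_sent]) < threshold_ctx:
--                 idx_end = idx_current_sent
--                 idx_current_sent += 1
--                 len_core_sent_in_seq = n_tokens_in_core_sentences(idx_start, idx_end, tokenized_sentences)
--             else:
--                 break
--         idx_core_sentences.append((idx_start, idx_end))
--     return idx_core_sentences
-- ===== SOURCE B (Python) =====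
-- def core_sentences_idx(tokenized_sentences, max_seq_len, min_context_len):
--     '''
--     Sets the number of sequences and their respective core sentences.
--     Same result as the original, but keeps a running token total instead of
--     re-summing the whole span after each extension.
--     '''
--     threshold_ctx = max_seq_len - min_context_len - 2
--     lens = [len(s) + 1 for s in tokenized_sentences]  # +1 for the future SEP token
--     n = len(lens)
--     result = []
--     i = 0
--     while i < n:
--         start = i
--         total = lens[i]
--         i += 1
--         while i < n and total < threshold_ctx and total + lens[i] - 1 < threshold_ctx:
--             total += lens[i]
--             i += 1
--         result.append((start, i - 1))
--     return result
-- ===== Notes on version B (the rewrite author's own statement) =====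
-- stated objective: alternative
-- what changed: Precomputes the per-sentence token lengths once and maintains the running span total incrementally, instead of re-summing the whole span via the helper after every extension; asymptotically this removes the inner re-sum, though spans stay short on typical thresholds so measured time is similar.
import Mathlib
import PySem

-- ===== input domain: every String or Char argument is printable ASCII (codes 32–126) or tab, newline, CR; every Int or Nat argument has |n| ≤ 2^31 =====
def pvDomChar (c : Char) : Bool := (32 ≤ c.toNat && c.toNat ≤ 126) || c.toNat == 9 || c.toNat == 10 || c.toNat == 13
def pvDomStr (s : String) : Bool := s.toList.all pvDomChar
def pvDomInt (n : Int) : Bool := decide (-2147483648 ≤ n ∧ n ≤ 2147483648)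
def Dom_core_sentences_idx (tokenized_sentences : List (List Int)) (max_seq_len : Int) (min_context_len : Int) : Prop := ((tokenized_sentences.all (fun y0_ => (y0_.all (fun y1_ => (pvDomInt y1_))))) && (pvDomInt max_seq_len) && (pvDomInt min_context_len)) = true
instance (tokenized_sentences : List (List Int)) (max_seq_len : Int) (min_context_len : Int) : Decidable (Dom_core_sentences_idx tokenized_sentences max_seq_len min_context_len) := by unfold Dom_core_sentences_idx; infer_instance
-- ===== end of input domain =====

-- B replaces A's re-summation of the current span (helper called after every extension)
-- by a precomputed length list and a running total maintained incrementally: same output.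


-- ===== PORT A =====
-- helper n_tokens_in_core_sentences: sums (len(ts[i]) + 1) over range(first, last+1)
def nTokensInCoreSentences (idx_first_sent idx_last_sent : Int) (tokenized_sentences : List (List Int)) : Int :=
  (PySem.List.pyRange idx_first_sent (idx_last_sent + 1) 1).foldl
    (fun n i => n + ((((PySem.List.pyGet? tokenized_sentences i).getD []).length : Int) + 1)) 0

-- inner while loop of A; state (idx_end, idx_current_sent, len_core_sent_in_seq); returns (idx_end, idx_current_sent)
def aInnerLoop (ts : List (List Int)) (thr idx_start : Int) :
    Int → Int → Int → Nat → Int × Int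
  | idx_end, cur, _lenCore, 0 => (idx_end, cur)
  | idx_end, cur, lenCore, fuel+1 =>
    if lenCore < thr ∧ cur < (ts.length : Int) then
      if lenCore + (((PySem.List.pyGet? ts cur).getD []).length : Int) < thr then
        aInnerLoop ts thr idx_start cur (cur + 1)
          (nTokensInCoreSentences idx_start cur ts) fuel
      else (idx_end, cur)
    else (idx_end, cur)

-- outer while loop of A
def aOuterLoop (ts : List (List Int)) (thr : Int) :
    Int → List (Int × Int) → Nat → List (Int × Int)
  | _, acc, 0 => acc
  | cur, acc, fuel+1 =>
    if cur < (ts.length : Int) then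
      aOuterLoop ts thr
        (aInnerLoop ts thr cur cur (cur + 1) (nTokensInCoreSentences cur cur ts) ts.length).2
        (acc ++ [(cur, (aInnerLoop ts thr cur cur (cur + 1) (nTokensInCoreSentences cur cur ts) ts.length).1)]) fuel
    else acc

def core_sentences_idx (tokenized_sentences : List (List Int)) (max_seq_len : Int) (min_context_len : Int) : List (Int × Int) :=
  aOuterLoop tokenized_sentences (max_seq_len - min_context_len - 2) 0 [] (tokenized_sentences.length + 1)

-- ===== PORT B =====
-- inner while loop of B; state (total, i); returns (total, i)
def bInnerLoop (lens : List Int) (thr : Int) : Int → Int → Nat → Int × Int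
  | total, i, 0 => (total, i)
  | total, i, fuel+1 =>
    if i < (lens.length : Int) ∧ total < thr ∧
        total + (PySem.List.pyGet? lens i).getD 0 - 1 < thr then
      bInnerLoop lens thr (total + (PySem.List.pyGet? lens i).getD 0) (i + 1) fuel
    else (total, i)

-- outer while loop of B
def bOuterLoop (lens : List Int) (thr : Int) :
    Int → List (Int × Int) → Nat → List (Int × Int)
  | _, acc, 0 => acc
  | i, acc, fuel+1 =>
    if i < (lens.length : Int) then
      bOuterLoop lens thr
        (bInnerLoop lens thr ((PySem.List.pyGet? lens i).getD 0) (i + 1) lens.length).2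
        (acc ++ [(i, (bInnerLoop lens thr ((PySem.List.pyGet? lens i).getD 0) (i + 1) lens.length).2 - 1)]) fuel
    else acc

def core_sentences_idx_alt (tokenized_sentences : List (List Int)) (max_seq_len : Int) (min_context_len : Int) : List (Int × Int) :=
  let lens := tokenized_sentences.map (fun s => (s.length : Int) + 1)
  bOuterLoop lens (max_seq_len - min_context_len - 2) 0 [] (tokenized_sentences.length + 1)

-- ===== PRECONDITION & SPEC =====
def Spec_core_sentences_idx (tokenized_sentences : List (List Int)) (max_seq_len : Int) (min_context_len : Int) (out : List (Int × Int)) : Prop := out = core_sentences_idx_alt tokenized_sentences max_seq_len min_context_len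
instance (tokenized_sentences : List (List Int)) (max_seq_len : Int) (min_context_len : Int) (out : List (Int × Int)) : Decidable (Spec_core_sentences_idx tokenized_sentences max_seq_len min_context_len out) := by unfold Spec_core_sentences_idx; infer_instance

-- ===== CLAIM (what is proved, stated in full; the proofs are below) =====
def Claim_equal_core_sentences_idx : Prop := ∀ (tokenized_sentences : List (List Int)) (max_seq_len : Int) (min_context_len : Int), Dom_core_sentences_idx tokenized_sentences max_seq_len min_context_len → Spec_core_sentences_idx tokenized_sentences max_seq_len min_context_len (core_sentences_idx tokenized_sentences max_seq_len min_context_len)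

-- ===== LEMMAS AND PROOFS =====

-- the length list B precomputes, of element i = len(ts[i]) + 1
def lensOf (ts : List (List Int)) : List Int := ts.map (fun s => (s.length : Int) + 1)

lemma lensOf_length (ts : List (List Int)) : (lensOf ts).length = ts.length := by
  simp [lensOf]

-- B's lens[i] in terms of A's ts[i], for a valid index
lemma lensOf_get (ts : List (List Int)) (i : Int) (h0 : 0 ≤ i) (h1 : i < (ts.length : Int)) :
    (PySem.List.pyGet? (lensOf ts) i).getD 0
      = (((PySem.List.pyGet? ts i).getD []).length : Int) + 1 := by
  rw [PySem.List.pyGet?_of_nonneg (h := h0), PySem.List.pyGet?_of_nonneg (h := h0)]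
  have hlt : i.toNat < ts.length := by omega
  simp [lensOf, hlt]

-- the helper's recurrence: appending sentence i to span [s, i-1]
lemma nTok_succ (ts : List (List Int)) (s i : Int) (h : s ≤ i) :
    nTokensInCoreSentences s i ts
      = nTokensInCoreSentences s (i - 1) ts
        + ((((PySem.List.pyGet? ts i).getD []).length : Int) + 1) := by
  unfold nTokensInCoreSentences
  rw [show i + 1 = (i - 1 + 1) + 1 by ring,
      PySem.List.pyRange_one_succ_right (by omega)]
  simp

-- the two inner loops run in lockstep
lemma inner_eq (ts : List (List Int)) (thr s : Int) :
    ∀ (fuel : Nat) (e L : Int), 0 ≤ e → s ≤ e → L = nTokensInCoreSentences s e ts →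
      aInnerLoop ts thr s e (e + 1) L fuel
        = ((bInnerLoop (lensOf ts) thr L (e + 1) fuel).2 - 1,
           (bInnerLoop (lensOf ts) thr L (e + 1) fuel).2) := by
  intro fuel
  induction fuel with
  | zero => intro e L _ _ _; simp [aInnerLoop, bInnerLoop]
  | succ f ih =>
    intro e L he hse hL
    rw [aInnerLoop, bInnerLoop, lensOf_length]
    by_cases hn : e + 1 < (ts.length : Int)
    · have hget := lensOf_get ts (e + 1) (by omega) hn
      by_cases hLt : L < thr
      · by_cases hfit : L + (((PySem.List.pyGet? ts (e + 1)).getD []).length : Int) < thr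
        · rw [if_pos ⟨hLt, hn⟩, if_pos hfit,
              if_pos (by refine ⟨hn, hLt, ?_⟩; rw [hget]; omega)]
          rw [hget]
          have : L + ((((PySem.List.pyGet? ts (e + 1)).getD []).length : Int) + 1)
              = nTokensInCoreSentences s (e + 1) ts := by
            rw [nTok_succ ts s (e + 1) (by omega)]; simp [hL]
          rw [show e + 1 + 1 = (e + 1) + 1 by ring, ← this]
          exact ih (e + 1) _ (by omega) (by omega) this
        · rw [if_pos ⟨hLt, hn⟩, if_neg hfit,
              if_neg (by rw [hget]; intro ⟨_, _, h3⟩; omega)]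
          simp
      · rw [if_neg (by tauto), if_neg (by tauto)]; simp
    · rw [if_neg (by tauto), if_neg (by tauto)]; simp

-- bInnerLoop never moves its index backwards
lemma bInner_ge (lens : List Int) (thr : Int) :
    ∀ (fuel : Nat) (total i : Int), i ≤ (bInnerLoop lens thr total i fuel).2 := by
  intro fuel
  induction fuel with
  | zero => intro total i; simp [bInnerLoop]
  | succ f ih =>
    intro total i
    rw [bInnerLoop]
    split
    · exact le_trans (by omega) (ih _ (i + 1))
    · simp

-- the two outer loops run in lockstep
lemma outer_eq (ts : List (List Int)) (thr : Int) :
    ∀ (fuel : Nat) (i : Int) (acc : List (Int × Int)), 0 ≤ i →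
      aOuterLoop ts thr i acc fuel = bOuterLoop (lensOf ts) thr i acc fuel := by
  intro fuel
  induction fuel with
  | zero => intro i acc _; rfl
  | succ f ih =>
    intro i acc hi
    rw [aOuterLoop, bOuterLoop, lensOf_length]
    by_cases hn : i < (ts.length : Int)
    · rw [if_pos hn, if_pos hn]
      have hstart : nTokensInCoreSentences i i ts = (PySem.List.pyGet? (lensOf ts) i).getD 0 := by
        rw [lensOf_get ts i hi hn]
        unfold nTokensInCoreSentences
        rw [PySem.List.pyRange_one_singleton]
        simp
      have hie := inner_eq ts thr i ts.length i (nTokensInCoreSentences i i ts) hi le_rfl rfl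
      rw [hie, hstart]
      exact ih _ _ (le_trans (by omega) (bInner_ge (lensOf ts) thr ts.length _ (i + 1)))
    · rw [if_neg hn, if_neg hn]

-- ===== VERDICT (by name: the statement is the Claim_ definition above) =====
theorem core_sentences_idx_spec : Claim_equal_core_sentences_idx := by
  intro ts msl mcl _
  unfold Spec_core_sentences_idx core_sentences_idx core_sentences_idx_alt
  exact outer_eq ts (msl - mcl - 2) (ts.length + 1) 0 [] le_rfl
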